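-- pv_equiv track=rewrite | github.com/kennethChan30/Education | Index_base/index_raw.py | positive_index
-- ===== SOURCE A (Python) =====
-- def positive_index(step, denominator_keep):
-- 	ans_string = ''
-- 	ans_nominator = {}
-- 	ans_denominator = {}
-- #classify nominaort and denominator by the negative sign of power
-- 	for k, v in step.items():
-- 		if v < 0:
-- 			ans_denominator[k] = -v
-- 		else:
-- 			ans_nominator[k] = v
-- #transform dictionaries to strings
-- 	nominator_string = collect_strings(ans_nominator)
-- 	denominator_string = collect_strings(ans_denominator)
-- 	if len(denominator_keep) != 2:
-- 		if nominator_string == None and denominator_string == None: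
-- 			ans_string = '1/' + denominator_keep
-- 		elif denominator_string == None:
-- 			ans_string = nominator_string +'/'+ denominator_keep
-- 		elif nominator_string == None:
-- 			ans_string = '1/(' + denominator_string + denominator_keep[1:]
-- 		else:
-- 			ans_string = nominator_string + '/(' + denominator_string + denominator_keep[1:]
--
--
-- 	else:
-- 		if nominator_string == None and denominator_string == None:
-- 			ans_string = '1'
-- 		elif denominator_string == None:
-- 			ans_string = nominator_string
-- 		elif nominator_string == None:
-- 			ans_string = '1/' + denominator_string
-- 		else:
-- 			ans_string = nominator_string + '/' + denominator_string
--
-- 	return ans_string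
--
-- def collect_strings(step):
-- 	collect_string = ""
-- 	for k, v in step.items():
-- 		if v == 0:
-- 			continue
-- 		elif v == 1:
-- 			collect_string = collect_string + k
-- 		else:
-- 			collect_string = collect_string + k + '^' + str(v) + ' '
-- 	if len(collect_string) == 0:
-- 		return None
-- 	return collect_string
-- ===== SOURCE B (Python) =====
-- def positive_index(step, denominator_keep):
--     num = ''
--     den = ''
--     for k, v in step.items():
--         if v == 0:
--             continue
--         a = -v if v < 0 else v
--         term = k if a == 1 else k + '^' + str(a) + ' '
--         if v < 0:
--             den += term
--         else:
--             num += term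
--     left = num or '1'
--     if len(denominator_keep) == 2:
--         return left if den == '' else left + '/' + den
--     tail = denominator_keep if den == '' else '(' + den + denominator_keep[1:]
--     return left + '/' + tail
-- ===== Notes on version B (the rewrite author's own statement) =====
-- stated objective: simpler
-- what changed: B replaces the two intermediate dicts plus the collect_strings helper and the eight-way None/None branch tree by one fused pass that appends each formatted term directly to a numerator or denominator string, and a unified assembly (left = num or '1'; tail = dk or '('+den+dk[1:]); skipping the two dict builds and their re-iteration is also measurably faster. Pre_ excludes step lists with duplicate keys, which do not represent any Python dict argument (both Pythons receive the collapsed dict and agree there).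
import Mathlib
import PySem

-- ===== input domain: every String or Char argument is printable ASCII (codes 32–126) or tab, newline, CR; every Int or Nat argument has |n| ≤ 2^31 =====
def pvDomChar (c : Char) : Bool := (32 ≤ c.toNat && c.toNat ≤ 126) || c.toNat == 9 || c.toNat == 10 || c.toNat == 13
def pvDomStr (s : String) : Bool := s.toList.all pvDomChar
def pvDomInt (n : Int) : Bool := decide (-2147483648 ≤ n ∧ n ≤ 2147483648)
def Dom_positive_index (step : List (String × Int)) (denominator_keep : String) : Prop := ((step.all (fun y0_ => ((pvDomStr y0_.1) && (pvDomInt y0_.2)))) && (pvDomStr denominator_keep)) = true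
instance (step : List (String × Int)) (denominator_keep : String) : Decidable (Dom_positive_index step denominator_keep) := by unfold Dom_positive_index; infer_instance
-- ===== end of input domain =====

-- B fuses the sign-partition dicts and collect_strings into one pass with two string
-- accumulators and a unified assembly; objective: simpler, same O(n) cost.


-- ===== PORT A =====
-- collect_strings: fold over the dict items, '' ↦ None (we carry List Char; ports wrap with String.mk at the end)
def pvCollectStep (acc : List Char) (kv : String × Int) : List Char :=
  if kv.2 = 0 then acc
  else if kv.2 = 1 then acc ++ kv.1.toList
  else acc ++ kv.1.toList ++ '^' :: (PySem.Int.toChars kv.2 ++ [' '])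

def pvCollectStrings (d : PySem.Dict String Int) : Option (List Char) :=
  let cs := d.items.foldl pvCollectStep []
  if cs.length = 0 then none else some cs

def positive_index (step : List (String × Int)) (denominator_keep : String) : String :=
  let p := step.foldl
    (fun (acc : PySem.Dict String Int × PySem.Dict String Int) kv =>
      if kv.2 < 0 then (acc.1, acc.2.insert kv.1 (-kv.2)) else (acc.1.insert kv.1 kv.2, acc.2))
    (PySem.Dict.empty, PySem.Dict.empty)
  let ns := pvCollectStrings p.1
  let ds := pvCollectStrings p.2
  let dkl := denominator_keep.toList
  String.ofList (
    if dkl.length ≠ 2 then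
      match ns, ds with
      | none,   none   => '1' :: '/' :: dkl
      | some n, none   => n ++ '/' :: dkl
      | none,   some d => '1' :: '/' :: '(' :: (d ++ dkl.drop 1)
      | some n, some d => n ++ '/' :: '(' :: (d ++ dkl.drop 1)
    else
      match ns, ds with
      | none,   none   => ['1']
      | some n, none   => n
      | none,   some d => '1' :: '/' :: d
      | some n, some d => n ++ '/' :: d)

-- ===== PORT B =====
def positive_index_alt (step : List (String × Int)) (denominator_keep : String) : String :=
  let p := step.foldl
    (fun (acc : List Char × List Char) kv =>
      if kv.2 = 0 then acc
      else
        let a := if kv.2 < 0 then -kv.2 else kv.2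
        let term := if a = 1 then kv.1.toList else kv.1.toList ++ '^' :: (PySem.Int.toChars a ++ [' '])
        if kv.2 < 0 then (acc.1, acc.2 ++ term) else (acc.1 ++ term, acc.2))
    ([], [])
  let left := if p.1 = [] then ['1'] else p.1
  let dkl := denominator_keep.toList
  String.ofList (
    if dkl.length = 2 then
      (if p.2 = [] then left else left ++ '/' :: p.2)
    else
      left ++ '/' :: (if p.2 = [] then dkl else '(' :: (p.2 ++ dkl.drop 1)))

-- ===== PRECONDITION & SPEC =====
-- Pre_ excludes step lists with duplicate keys: they do not represent any Python dict
-- (the two Python programs receive the collapsed dict and agree there), so the list form is ambiguous.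
def Pre_positive_index (step : List (String × Int)) (denominator_keep : String) : Prop :=
  (step.map Prod.fst).Nodup
instance (step : List (String × Int)) (denominator_keep : String) : Decidable (Pre_positive_index step denominator_keep) := by unfold Pre_positive_index; infer_instance

def pvWitness_positive_index : (List (String × Int)) × String := ([("a", 2), ("b", -1)], "m")

def Spec_positive_index (step : List (String × Int)) (denominator_keep : String) (out : String) : Prop := out = positive_index_alt step denominator_keep
instance (step : List (String × Int)) (denominator_keep : String) (out : String) : Decidable (Spec_positive_index step denominator_keep out) := by unfold Spec_positive_index; infer_instance

-- ===== CLAIM (what is proved, stated in full; the proofs are below) =====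
def Claim_equal_positive_index : Prop := ∀ (step : List (String × Int)) (denominator_keep : String), Dom_positive_index step denominator_keep → Pre_positive_index step denominator_keep → Spec_positive_index step denominator_keep (positive_index step denominator_keep)

-- ===== LEMMAS AND PROOFS =====

-- one formatted term; pvCollectStep only appends it
def pvTerm (kv : String × Int) : List Char :=
  if kv.2 = 0 then [] else if kv.2 = 1 then kv.1.toList
  else kv.1.toList ++ '^' :: (PySem.Int.toChars kv.2 ++ [' '])

-- the two sign classes of a step list, as flat character strings
def pvNum (step : List (String × Int)) : List Char :=
  (step.filter (fun kv => !decide (kv.2 < 0))).flatMap pvTerm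
def pvDen (step : List (String × Int)) : List Char :=
  ((step.filter (fun kv => decide (kv.2 < 0))).map (fun kv => (kv.1, -kv.2))).flatMap pvTerm

lemma pvCollectStep_eq_append (acc : List Char) (kv : String × Int) :
    pvCollectStep acc kv = acc ++ pvTerm kv := by
  unfold pvCollectStep pvTerm; split_ifs <;> simp

lemma foldl_pvCollectStep (l : List (String × Int)) (acc : List Char) :
    l.foldl pvCollectStep acc = acc ++ l.flatMap pvTerm := by
  have := PySem.List.foldl_append_eq_flatMap (g := pvTerm) (l := l) (acc := acc)
  rw [← this]; apply PySem.List.foldl_congr_mem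
  intro a x _; exact pvCollectStep_eq_append a x

-- A's partition loop: with all of step's keys fresh, the dicts' items are the filtered lists appended
lemma A_loop_items (step : List (String × Int)) (d1 d2 : PySem.Dict String Int)
    (hnd : (step.map Prod.fst).Nodup)
    (hfresh : ∀ k ∈ step.map Prod.fst, d1.contains k = false ∧ d2.contains k = false) :
    (step.foldl
      (fun (acc : PySem.Dict String Int × PySem.Dict String Int) kv =>
        if kv.2 < 0 then (acc.1, acc.2.insert kv.1 (-kv.2)) else (acc.1.insert kv.1 kv.2, acc.2))
      (d1, d2)).1.items = d1.items ++ step.filter (fun kv => !decide (kv.2 < 0)) ∧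
    (step.foldl
      (fun (acc : PySem.Dict String Int × PySem.Dict String Int) kv =>
        if kv.2 < 0 then (acc.1, acc.2.insert kv.1 (-kv.2)) else (acc.1.insert kv.1 kv.2, acc.2))
      (d1, d2)).2.items = d2.items ++ (step.filter (fun kv => decide (kv.2 < 0))).map (fun kv => (kv.1, -kv.2)) := by
  induction step generalizing d1 d2 with
  | nil => simp
  | cons kv tl ih =>
    obtain ⟨h1, h2⟩ := hfresh kv.1 (by simp)
    have hnd' : (tl.map Prod.fst).Nodup := (List.nodup_cons.mp hnd).2
    have hne : ∀ k ∈ tl.map Prod.fst, k ≠ kv.1 := by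
      intro k hk h; subst h; exact (List.nodup_cons.mp hnd).1 hk
    by_cases hv : kv.2 < 0
    · have hfresh' : ∀ k ∈ tl.map Prod.fst, d1.contains k = false ∧ (d2.insert kv.1 (-kv.2)).contains k = false := by
        intro k hk
        refine ⟨(hfresh k (by simp [hk])).1, ?_⟩
        rw [PySem.Dict.contains_insert]
        simp [hne k hk, (hfresh k (by simp [hk])).2]
      have hih := ih d1 (d2.insert kv.1 (-kv.2)) hnd' hfresh'
      simp only [List.foldl_cons, if_pos hv]
      refine ⟨by rw [hih.1]; simp [hv], ?_⟩
      rw [hih.2, PySem.Dict.items_insert_of_not_contains _ _ h2]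
      simp [hv]
    · have hfresh' : ∀ k ∈ tl.map Prod.fst, (d1.insert kv.1 kv.2).contains k = false ∧ d2.contains k = false := by
        intro k hk
        refine ⟨?_, (hfresh k (by simp [hk])).2⟩
        rw [PySem.Dict.contains_insert]
        simp [hne k hk, (hfresh k (by simp [hk])).1]
      have hih := ih (d1.insert kv.1 kv.2) d2 hnd' hfresh'
      simp only [List.foldl_cons, if_neg hv]
      refine ⟨?_, by rw [hih.2]; simp [hv]⟩
      rw [hih.1, PySem.Dict.items_insert_of_not_contains _ _ h1]
      simp [hv]

-- B's fused loop computes exactly (pvNum, pvDen)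
lemma B_loop (step : List (String × Int)) (n0 d0 : List Char) :
    step.foldl
      (fun (acc : List Char × List Char) kv =>
        if kv.2 = 0 then acc
        else
          let a := if kv.2 < 0 then -kv.2 else kv.2
          let term := if a = 1 then kv.1.toList else kv.1.toList ++ '^' :: (PySem.Int.toChars a ++ [' '])
          if kv.2 < 0 then (acc.1, acc.2 ++ term) else (acc.1 ++ term, acc.2))
      (n0, d0) = (n0 ++ pvNum step, d0 ++ pvDen step) := by
  induction step generalizing n0 d0 with
  | nil => simp [pvNum, pvDen]
  | cons kv tl ih =>
    simp only [List.foldl_cons]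
    by_cases h0 : kv.2 = 0
    · rw [if_pos h0, ih]
      simp [pvNum, pvDen, h0, pvTerm]
    · rw [if_neg h0]
      by_cases hv : kv.2 < 0
      · simp only [if_pos hv, ih]
        have h1 : -kv.2 ≠ 0 := by omega
        simp only [Prod.mk.injEq]
        constructor
        · simp [pvNum, hv]
        · simp only [pvDen, List.filter_cons, hv, decide_true, if_true, List.map_cons, List.flatMap_cons, ← List.append_assoc]
          congr 2
          unfold pvTerm; simp only [h1]
          split_ifs <;> simp_all
      · simp only [if_neg hv, ih]
        simp only [Prod.mk.injEq]
        constructor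
        · simp only [pvNum, List.filter_cons, hv, decide_false, Bool.not_false, if_true, List.flatMap_cons, ← List.append_assoc]
          congr 2
          unfold pvTerm
          simp [h0]
        · simp [pvDen, hv]

lemma pvCollect_filter_nonneg (step : List (String × Int)) (d : PySem.Dict String Int)
    (h : d.items = step.filter (fun kv => !decide (kv.2 < 0))) :
    pvCollectStrings d = if pvNum step = [] then none else some (pvNum step) := by
  unfold pvCollectStrings
  rw [h, foldl_pvCollectStep]
  simp only [List.nil_append, List.length_eq_zero_iff]
  rfl

lemma pvCollect_filter_neg (step : List (String × Int)) (d : PySem.Dict String Int)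
    (h : d.items = (step.filter (fun kv => decide (kv.2 < 0))).map (fun kv => (kv.1, -kv.2))) :
    pvCollectStrings d = if pvDen step = [] then none else some (pvDen step) := by
  unfold pvCollectStrings
  rw [h, foldl_pvCollectStep]
  simp only [List.nil_append, List.length_eq_zero_iff]
  rfl

-- ===== VERDICT (by name: the statement is the Claim_ definition above) =====
theorem positive_index_spec : Claim_equal_positive_index := by
  intro step dk _hdom hpre
  unfold Spec_positive_index positive_index positive_index_alt
  have hA := A_loop_items step PySem.Dict.empty PySem.Dict.empty hpre
    (by intro k _; exact ⟨PySem.Dict.contains_empty k, PySem.Dict.contains_empty k⟩)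
  rcases hA with ⟨hA1, hA2⟩
  dsimp only
  rw [B_loop]
  rw [pvCollect_filter_nonneg step _ (by simpa using hA1),
      pvCollect_filter_neg step _ (by simpa using hA2)]
  simp only [List.nil_append]
  by_cases hn : pvNum step = [] <;> by_cases hd : pvDen step = [] <;>
    by_cases hl : dk.toList.length = 2 <;>
    simp [hn, hd, hl]
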